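-- pv_equiv track=rewrite | github.com/jarvis-00001/Memory-Management-Visualizer | app.py | allocate_segment
-- ===== SOURCE A (Python) =====
-- def allocate_segment(memory, size, segment_id, method):
--     free_blocks = [(start, block_size) for start, block_size, id in memory if id is None and block_size >= size]
--
--     if not free_blocks:
--         return None
--
--     if method == "First Fit":
--         start, block_size = free_blocks[0]
--     elif method == "Best Fit":
--         start, block_size = min(free_blocks, key=lambda x: x[1])
--     else:  # Worst Fit
--         start, block_size = max(free_blocks, key=lambda x: x[1])
--
--     # Find the index of the free block in memory
--     for i, (block_start, block_size, block_id) in enumerate(memory):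
--         if block_start == start and block_id is None:
--             # Remove the free block
--             memory.pop(i)
--
--             # Add the allocated block
--             memory.insert(i, (start, size, segment_id))
--
--             # If there's remaining space, add a new free block
--             if block_size > size:
--                 memory.insert(i + 1, (start + size, block_size - size, None))
--
--             # Sort memory blocks by start address
--             memory.sort(key=lambda x: x[0])
--
--             return (start, size)
--
--     return None
-- ===== SOURCE B (Python) =====
-- def allocate_segment(memory, size, segment_id, method):
--     # Single pass over memory keeping the best candidate (index, start, block_size);
--     # strict comparisons make the earliest extremal block win, as Python's min/max do.
--     best = None
--     for i, (start, block_size, block_id) in enumerate(memory):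
--         if block_id is not None or block_size < size:
--             continue
--         if method == "First Fit":
--             best = (i, start, block_size)
--             break
--         if best is None:
--             best = (i, start, block_size)
--         elif method == "Best Fit":
--             if block_size < best[2]:
--                 best = (i, start, block_size)
--         elif block_size > best[2]:
--             best = (i, start, block_size)
--     if best is None:
--         return None
--     i, start, block_size = best
--     memory.pop(i)
--     memory.insert(i, (start, size, segment_id))
--     if block_size > size:
--         memory.insert(i + 1, (start + size, block_size - size, None))
--     memory.sort(key=lambda x: x[0])
--     return (start, size)
-- ===== Notes on version B (the rewrite author's own statement) =====
-- stated objective: simpler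
-- what changed: Replaced A's three phases (build a free-block list, take head/min/max of it, then re-scan memory for the chosen start) with one pass over enumerate(memory) that keeps the best candidate index directly, using strict comparisons so the earliest extremal block wins; the equivalence proved is about the return value only (both functions also mutate memory in place, and on degenerate lists with two free blocks sharing a start address A may pop a different block than B, but the returned pair is the same).
import Mathlib
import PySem

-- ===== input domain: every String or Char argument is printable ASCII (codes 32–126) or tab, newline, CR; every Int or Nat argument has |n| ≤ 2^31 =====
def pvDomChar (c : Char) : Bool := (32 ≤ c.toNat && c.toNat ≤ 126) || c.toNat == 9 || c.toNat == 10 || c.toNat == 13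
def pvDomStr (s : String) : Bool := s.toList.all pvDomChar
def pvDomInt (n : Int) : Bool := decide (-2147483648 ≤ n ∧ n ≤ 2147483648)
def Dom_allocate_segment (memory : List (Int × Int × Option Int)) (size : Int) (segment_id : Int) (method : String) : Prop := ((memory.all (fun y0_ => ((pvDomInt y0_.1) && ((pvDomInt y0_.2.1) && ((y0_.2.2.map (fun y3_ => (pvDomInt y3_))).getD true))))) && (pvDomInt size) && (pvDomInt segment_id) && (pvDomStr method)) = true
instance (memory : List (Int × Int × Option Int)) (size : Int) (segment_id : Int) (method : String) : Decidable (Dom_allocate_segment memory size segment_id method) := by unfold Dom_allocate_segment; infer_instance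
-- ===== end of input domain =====

-- ===== PORT A =====
-- B replaces A's three phases (free-block list, head/min/max, re-scan for the chosen start) by one
-- candidate-keeping pass: simpler. Both Pythons mutate `memory` in place; the equivalence proved here
-- is about the RETURN value only (the in-place pop/insert/sort lines have no counterpart on immutable
-- Lean lists and are omitted from both ports).

-- A's final `for i, ... in enumerate(memory)` loop: first block with matching start and id None
-- returns (start, size); falling off the loop returns None. (The pop/insert/sort mutations it
-- performs before returning do not contribute to the return value.)
def searchA (memory : List (Int × Int × Option Int)) (start size : Int) : Option (Int × Int) :=
  match memory with
  | [] => none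
  | (block_start, _, block_id) :: rest =>
    if block_start == start && block_id == none then some (start, size)
    else searchA rest start size

def allocate_segment (memory : List (Int × Int × Option Int)) (size : Int) (segment_id : Int) (method : String) : Option (Int × Int) :=
  let free_blocks := (memory.filter (fun b => b.2.2 == none && size ≤ b.2.1)).map (fun b => (b.1, b.2.1))
  if free_blocks = [] then none
  else
    -- Python destructures unconditionally; `chosen` is provably `some` here since free_blocks ≠ []
    let chosen : Option (Int × Int) :=
      if method == "First Fit" then free_blocks.head?
      else if method == "Best Fit" then PySem.List.min? free_blocks (fun x => x.2)
      else PySem.List.max? free_blocks (fun x => x.2)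
    match chosen with
    | none => none
    | some (start, _) => searchA memory start size

-- ===== PORT B =====
-- B's single pass: best = (index, start, block_size) of the current candidate.
def altPick (size : Int) (method : String) (l : List (Int × Int × Option Int)) (i : Int)
    (best : Option (Int × Int × Int)) : Option (Int × Int × Int) :=
  match l with
  | [] => best
  | (start, block_size, block_id) :: rest =>
    if block_id == none && size ≤ block_size then
      if method == "First Fit" then some (i, start, block_size)
      else
        match best with
        | none => altPick size method rest (i + 1) (some (i, start, block_size))
        | some (j, s0, b0) =>
          if method == "Best Fit" then
            if block_size < b0 then altPick size method rest (i + 1) (some (i, start, block_size))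
            else altPick size method rest (i + 1) (some (j, s0, b0))
          else
            if b0 < block_size then altPick size method rest (i + 1) (some (i, start, block_size))
            else altPick size method rest (i + 1) (some (j, s0, b0))
    else altPick size method rest (i + 1) best

def allocate_segment_alt (memory : List (Int × Int × Option Int)) (size : Int) (segment_id : Int) (method : String) : Option (Int × Int) :=
  -- (Source B then pops/inserts/sorts `memory` in place using the candidate's index; return value only here)
  match altPick size method memory 0 none with
  | none => none
  | some (_, start, _) => some (start, size)

-- ===== PRECONDITION & SPEC =====
def Spec_allocate_segment (memory : List (Int × Int × Option Int)) (size : Int) (segment_id : Int) (method : String) (out : Option (Int × Int)) : Prop := out = allocate_segment_alt memory size segment_id method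
instance (memory : List (Int × Int × Option Int)) (size : Int) (segment_id : Int) (method : String) (out : Option (Int × Int)) : Decidable (Spec_allocate_segment memory size segment_id method out) := by unfold Spec_allocate_segment; infer_instance

-- ===== CLAIM (what is proved, stated in full; the proofs are below) =====
def Claim_equal_allocate_segment : Prop := ∀ (memory : List (Int × Int × Option Int)) (size : Int) (segment_id : Int) (method : String), Dom_allocate_segment memory size segment_id method → Spec_allocate_segment memory size segment_id method (allocate_segment memory size segment_id method)

-- ===== LEMMAS AND PROOFS =====

def pvFree (size : Int) (b : Int × Int × Option Int) : Bool := b.2.2 == none && size ≤ b.2.1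

def pvStrip (x : Int × Int × Int) : Int × Int := (x.2.1, x.2.2)

theorem searchA_some (size start : Int) :
    ∀ (l : List (Int × Int × Option Int)), (∃ b ∈ l, b.1 = start ∧ b.2.2 = none) →
    searchA l start size = some (start, size) := by
  intro l
  induction l with
  | nil => rintro ⟨b, hb, _⟩; cases hb
  | cons hd tl ih =>
    rintro ⟨b, hb, hs, hid⟩
    obtain ⟨bs, bsz, bid⟩ := hd
    by_cases hc : (bs == start && bid == none) = true
    · simp only [searchA]
      rw [if_pos hc]
    · simp only [searchA]
      rw [if_neg (by simpa using hc)]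
      apply ih
      rcases List.mem_cons.mp hb with rfl | hb'
      · exfalso; apply hc; simp_all
      · exact ⟨b, hb', hs, hid⟩

theorem altPick_of_filter_nil (size : Int) (method : String) :
    ∀ (l : List (Int × Int × Option Int)) (i : Int) (acc : Option (Int × Int × Int)),
    l.filter (pvFree size) = [] → altPick size method l i acc = acc := by
  intro l
  induction l with
  | nil => intro i acc _; rfl
  | cons hd tl ih =>
    intro i acc hf
    obtain ⟨st, bsz, bid⟩ := hd
    simp only [List.filter_cons] at hf
    by_cases hc : pvFree size (st, bsz, bid) = true
    · simp [hc] at hf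
    · simp only [hc, Bool.false_eq_true, if_false] at hf
      simp only [altPick]
      rw [if_neg (by simpa [pvFree] using hc)]
      exact ih (i + 1) acc hf

theorem altPick_first (size : Int) (method : String) (h1 : (method == "First Fit") = true) :
    ∀ (l : List (Int × Int × Option Int)) (i : Int),
    Option.map pvStrip (altPick size method l i none)
      = ((l.filter (pvFree size)).map (fun b => (b.1, b.2.1))).head? := by
  intro l
  induction l with
  | nil => intro i; rfl
  | cons hd tl ih =>
    intro i
    obtain ⟨st, bsz, bid⟩ := hd
    simp only [altPick, List.filter_cons]
    by_cases hc : pvFree size (st, bsz, bid) = true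
    · rw [if_pos (by simpa [pvFree] using hc), if_pos h1, hc]
      simp [pvStrip]
    · rw [if_neg (by simpa [pvFree] using hc)]
      simp only [hc, Bool.false_eq_true, if_false]
      exact ih (i + 1)

theorem altPick_best (size : Int) (method : String)
    (h1 : (method == "First Fit") = false) (h2 : (method == "Best Fit") = true) :
    ∀ (l : List (Int × Int × Option Int)) (i : Int) (acc : Option (Int × Int × Int)),
    Option.map pvStrip (altPick size method l i acc)
      = List.foldl (fun m (x : Int × Int) =>
          match m with
          | none => some x
          | some m' => if x.2 < m'.2 then some x else some m')
        (Option.map pvStrip acc) ((l.filter (pvFree size)).map (fun b => (b.1, b.2.1))) := by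
  intro l
  induction l with
  | nil => intro i acc; rfl
  | cons hd tl ih =>
    intro i acc
    obtain ⟨st, bsz, bid⟩ := hd
    simp only [altPick, List.filter_cons]
    by_cases hc : pvFree size (st, bsz, bid) = true
    · rw [hc]
      rw [if_pos (by simpa [pvFree] using hc), h1]
      simp only [Bool.false_eq_true, if_false, List.map_cons, List.foldl_cons]
      cases acc with
      | none => rw [ih]; rfl
      | some a =>
        obtain ⟨j, s0, b0⟩ := a
        simp only [h2, if_true]
        by_cases hlt : bsz < b0
        · rw [if_pos hlt, ih]; simp [pvStrip, hlt]
        · rw [if_neg hlt, ih]; simp [pvStrip, hlt]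
    · rw [if_neg (by simpa [pvFree] using hc)]
      simp only [hc, Bool.false_eq_true, if_false]
      exact ih (i + 1) acc

theorem altPick_worst (size : Int) (method : String)
    (h1 : (method == "First Fit") = false) (h2 : (method == "Best Fit") = false) :
    ∀ (l : List (Int × Int × Option Int)) (i : Int) (acc : Option (Int × Int × Int)),
    Option.map pvStrip (altPick size method l i acc)
      = List.foldl (fun m (x : Int × Int) =>
          match m with
          | none => some x
          | some m' => if m'.2 < x.2 then some x else some m')
        (Option.map pvStrip acc) ((l.filter (pvFree size)).map (fun b => (b.1, b.2.1))) := by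
  intro l
  induction l with
  | nil => intro i acc; rfl
  | cons hd tl ih =>
    intro i acc
    obtain ⟨st, bsz, bid⟩ := hd
    simp only [altPick, List.filter_cons]
    by_cases hc : pvFree size (st, bsz, bid) = true
    · rw [hc]
      rw [if_pos (by simpa [pvFree] using hc), h1]
      simp only [Bool.false_eq_true, if_false]
      cases acc with
      | none => rw [ih]; rfl
      | some a =>
        obtain ⟨j, s0, b0⟩ := a
        simp only [h2, Bool.false_eq_true, if_false]
        by_cases hlt : b0 < bsz
        · rw [if_pos hlt, ih]; simp [pvStrip, hlt]
        · rw [if_neg hlt, ih]; simp [pvStrip, hlt]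
    · rw [if_neg (by simpa [pvFree] using hc)]
      simp only [hc, Bool.false_eq_true, if_false]
      exact ih (i + 1) acc

theorem searchA_of_mem_fb (memory : List (Int × Int × Option Int)) (size : Int)
    (m : Int × Int) (hm : m ∈ (memory.filter (pvFree size)).map (fun b => (b.1, b.2.1))) :
    searchA memory m.1 size = some (m.1, size) := by
  obtain ⟨b, hb, rfl⟩ := List.mem_map.mp hm
  obtain ⟨hbm, hpb⟩ := List.mem_filter.mp hb
  refine searchA_some size b.1 memory ⟨b, hbm, rfl, ?_⟩
  simp only [List.mem_filter, pvFree, Bool.and_eq_true, beq_iff_eq] at hb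
  exact hb.2.1

theorem strip_some (X : Option (Int × Int × Int)) (m : Int × Int)
    (h : Option.map pvStrip X = some m) : ∃ j, X = some (j, m.1, m.2) := by
  cases X with
  | none => simp at h
  | some x =>
    obtain ⟨j, st, bs⟩ := x
    simp only [Option.map_some, pvStrip, Option.some_inj] at h
    exact ⟨j, by rw [← h]⟩



theorem ports_agree (memory : List (Int × Int × Option Int)) (size segment_id : Int) (method : String) :
    allocate_segment memory size segment_id method = allocate_segment_alt memory size segment_id method := by
  unfold allocate_segment allocate_segment_alt
  have hfun : (fun b : Int × Int × Option Int => b.2.2 == none && decide (size ≤ b.2.1)) = pvFree size := by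
    funext b; rfl
  by_cases hfl : memory.filter (pvFree size) = []
  · rw [altPick_of_filter_nil size method memory 0 none hfl, hfun, hfl]
    rfl
  · have hfb : (memory.filter (pvFree size)).map (fun b => (b.1, b.2.1)) ≠ [] := by
      simpa using hfl
    simp only [hfun]
    rw [if_neg hfb]
    by_cases h1 : (method == "First Fit") = true
    · rw [if_pos h1]
      obtain ⟨b, t, hcons⟩ := List.exists_cons_of_ne_nil hfb
      have hm : b ∈ (memory.filter (pvFree size)).map (fun x => (x.1, x.2.1)) := by
        rw [hcons]; exact List.mem_cons_self
      have hX : Option.map pvStrip (altPick size method memory 0 none)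
          = some b := by rw [altPick_first size method h1 memory 0, hcons]; rfl
      obtain ⟨j, hj⟩ := strip_some _ _ hX
      rw [hcons, hj]
      simpa using searchA_of_mem_fb memory size b hm
    · rw [if_neg h1]
      by_cases h2 : (method == "Best Fit") = true
      · rw [if_pos h2]
        have hX := altPick_best size method (by simpa using h1) h2 memory 0 none
        simp only [Option.map_none] at hX
        have hmin : PySem.List.min? ((memory.filter (pvFree size)).map (fun b => (b.1, b.2.1))) (fun x => x.2)
            = List.foldl (fun m (x : Int × Int) =>
                match m with
                | none => some x
                | some m' => if x.2 < m'.2 then some x else some m')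
              none ((memory.filter (pvFree size)).map (fun b => (b.1, b.2.1))) := by
          unfold PySem.List.min?
          congr 1
          funext m x
          cases m <;> simp
        cases hmineq : PySem.List.min? ((memory.filter (pvFree size)).map (fun b => (b.1, b.2.1))) (fun x => x.2) with
        | none => exact absurd ((PySem.List.min?_eq_none_iff _ _).mp hmineq) hfb
        | some m =>
          have hm : m ∈ (memory.filter (pvFree size)).map (fun b => (b.1, b.2.1)) :=
            PySem.List.min?_mem hmineq
          have hX2 : Option.map pvStrip (altPick size method memory 0 none) = some m := by
            rw [hX, ← hmin, hmineq]
          obtain ⟨j, hj⟩ := strip_some _ _ hX2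
          rw [hj]
          simpa using searchA_of_mem_fb memory size m hm
      · rw [if_neg h2]
        have hX := altPick_worst size method (by simpa using h1) (by simpa using h2) memory 0 none
        simp only [Option.map_none] at hX
        have hmax : PySem.List.max? ((memory.filter (pvFree size)).map (fun b => (b.1, b.2.1))) (fun x => x.2)
            = List.foldl (fun m (x : Int × Int) =>
                match m with
                | none => some x
                | some m' => if m'.2 < x.2 then some x else some m')
              none ((memory.filter (pvFree size)).map (fun b => (b.1, b.2.1))) := by
          unfold PySem.List.max?
          congr 1
          funext m x
          cases m <;> simp
        cases hmaxeq : PySem.List.max? ((memory.filter (pvFree size)).map (fun b => (b.1, b.2.1))) (fun x => x.2) with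
        | none => exact absurd ((PySem.List.max?_eq_none_iff _ _).mp hmaxeq) hfb
        | some m =>
          have hm : m ∈ (memory.filter (pvFree size)).map (fun b => (b.1, b.2.1)) :=
            PySem.List.max?_mem hmaxeq
          have hX2 : Option.map pvStrip (altPick size method memory 0 none) = some m := by
            rw [hX, ← hmax, hmaxeq]
          obtain ⟨j, hj⟩ := strip_some _ _ hX2
          rw [hj]
          simpa using searchA_of_mem_fb memory size m hm

-- ===== VERDICT (by name: the statement is the Claim_ definition above) =====
theorem allocate_segment_spec : Claim_equal_allocate_segment := by
  intro memory size segment_id method _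
  exact ports_agree memory size segment_id method
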